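-- pv_equiv track=rewrite | github.com/HenryGreene10/propertyfish | scripts/ingest_dob_permits.py | order_candidate_fields
-- ===== SOURCE A (Python) =====
-- from typing import Any, Dict, Iterable, List, Optional, Tuple
--
-- PREFERRED_FIELDS = [
--     "issuance_date",
--     "filing_date",
--     "status_date",
--     "expiration_date",
-- ]
--
-- def order_candidate_fields(fields: List[Tuple[str, str]]) -> List[Tuple[str, str]]:
--     ordered: List[Tuple[str, str]] = []
--     seen: set[str] = set()
--     for preferred in PREFERRED_FIELDS:
--         for field, dtype in fields:
--             if field.lower() == preferred and field.lower() not in seen: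
--                 ordered.append((field, dtype))
--                 seen.add(field.lower())
--     for field, dtype in fields:
--         if field.lower() not in seen:
--             ordered.append((field, dtype))
--             seen.add(field.lower())
--     return ordered
-- ===== SOURCE B (Python) =====
-- PREFERRED_FIELDS = [
--     "issuance_date",
--     "filing_date",
--     "status_date",
--     "expiration_date",
-- ]
--
-- def order_candidate_fields(fields):
--     # One pass: first occurrence of each lowercase key, in insertion order.
--     first = {}
--     for field, dtype in fields:
--         key = field.lower()
--         if key not in first:
--             first[key] = (field, dtype)
--     preferred_set = set(PREFERRED_FIELDS)
--     head = [first[p] for p in PREFERRED_FIELDS if p in first]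
--     tail = [item for key, item in first.items() if key not in preferred_set]
--     return head + tail
-- ===== Notes on version B (the rewrite author's own statement) =====
-- stated objective: simpler
-- what changed: Replaces the nested PREFERRED x fields scan (plus a second dedup pass) by a single pass building a first-occurrence dict keyed by lowercase name, then emitting present preferred keys followed by the remaining entries in insertion order.
import Mathlib
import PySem

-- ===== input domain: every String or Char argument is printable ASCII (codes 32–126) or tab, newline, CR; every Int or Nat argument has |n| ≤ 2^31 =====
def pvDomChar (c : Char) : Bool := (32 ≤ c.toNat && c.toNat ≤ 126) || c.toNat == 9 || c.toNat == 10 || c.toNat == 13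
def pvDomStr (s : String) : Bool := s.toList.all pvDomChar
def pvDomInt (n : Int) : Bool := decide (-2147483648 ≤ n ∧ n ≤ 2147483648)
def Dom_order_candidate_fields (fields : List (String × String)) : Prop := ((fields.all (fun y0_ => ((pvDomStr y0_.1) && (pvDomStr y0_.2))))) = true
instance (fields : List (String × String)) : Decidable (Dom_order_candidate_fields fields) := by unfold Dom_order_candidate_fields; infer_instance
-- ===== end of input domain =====

-- B replaces A's nested PREFERRED×fields scan with one pass building a first-occurrence
-- dict keyed by lowercase name; same return value, simpler decomposition.

def PREFERRED_FIELDS : List String :=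
  ["issuance_date", "filing_date", "status_date", "expiration_date"]

-- ===== PORT A =====
def order_candidate_fields (fields : List (String × String)) : List (String × String) :=
  let st1 := PREFERRED_FIELDS.foldl
    (fun (st : List (String × String) × PySem.Set String) preferred =>
      fields.foldl
        (fun st fd =>
          if PySem.Str.lower fd.1 == preferred
              && !(PySem.Set.contains st.2 (PySem.Str.lower fd.1)) then
            (st.1 ++ [fd], PySem.Set.add st.2 (PySem.Str.lower fd.1))
          else st) st)
    ([], PySem.Set.empty)
  let st2 := fields.foldl
    (fun (st : List (String × String) × PySem.Set String) fd =>
      if !(PySem.Set.contains st.2 (PySem.Str.lower fd.1)) then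
        (st.1 ++ [fd], PySem.Set.add st.2 (PySem.Str.lower fd.1))
      else st) st1
  st2.1

-- ===== PORT B =====
def order_candidate_fields_alt (fields : List (String × String)) : List (String × String) :=
  let first := fields.foldl
    (fun (d : PySem.Dict String (String × String)) fd =>
      if PySem.Dict.contains d (PySem.Str.lower fd.1) then d
      else PySem.Dict.insert d (PySem.Str.lower fd.1) fd)
    PySem.Dict.empty
  let preferredSet := PySem.Set.ofList PREFERRED_FIELDS
  let head := (PREFERRED_FIELDS.filter (fun p => PySem.Dict.contains first p)).map
      (fun p => (PySem.Dict.get? first p).getD ("", ""))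
  let tail := (first.items.filter
      (fun kv => !(PySem.Set.contains preferredSet kv.1))).map (fun kv => kv.2)
  head ++ tail

-- ===== PRECONDITION & SPEC =====
def Spec_order_candidate_fields (fields : List (String × String)) (out : List (String × String)) : Prop := out = order_candidate_fields_alt fields
instance (fields : List (String × String)) (out : List (String × String)) : Decidable (Spec_order_candidate_fields fields out) := by unfold Spec_order_candidate_fields; infer_instance

-- ===== CLAIM (what is proved, stated in full; the proofs are below) =====
def Claim_equal_order_candidate_fields : Prop := ∀ (fields : List (String × String)), Dom_order_candidate_fields fields → Spec_order_candidate_fields fields (order_candidate_fields fields)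

-- ===== LEMMAS AND PROOFS =====

-- first match in `fields` whose lowercased name is `p`
def pvFind (fields : List (String × String)) (p : String) : Option (String × String) :=
  fields.find? (fun fd => PySem.Str.lower fd.1 == p)

-- first occurrences of each lowercase key not yet "seen", in order, paired with the key
def pvFirsts (l : List (String × String)) (s : String → Bool) :
    List (String × (String × String)) :=
  match l with
  | [] => []
  | fd :: r =>
      if s (PySem.Str.lower fd.1) then pvFirsts r s
      else (PySem.Str.lower fd.1, fd) ::
        pvFirsts r (fun k => k == PySem.Str.lower fd.1 || s k)

theorem pvFirsts_congr (l : List (String × String)) (s t : String → Bool)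
    (h : ∀ k, s k = t k) : pvFirsts l s = pvFirsts l t := by
  have hst : s = t := funext h
  rw [hst]

theorem pvFirsts_or (l : List (String × String)) (s t : String → Bool) :
    pvFirsts l (fun k => s k || t k)
      = (pvFirsts l t).filter (fun kv => !(s kv.1)) := by
  induction l generalizing t with
  | nil => rfl
  | cons fd r ih =>
      simp only [pvFirsts]
      by_cases ht : t (PySem.Str.lower fd.1)
      · have he : (fun k => k == PySem.Str.lower fd.1 || t k) = t :=
          funext fun k => by
            by_cases hk : k = PySem.Str.lower fd.1
            · simp [hk, ht]
            · have hb : (k == PySem.Str.lower fd.1) = false := by simpa using hk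
              simp [hb]
        rw [if_pos (by simp [ht]), if_pos ht, ih t]
      · by_cases hs : s (PySem.Str.lower fd.1)
        · rw [if_pos (by simp [hs]), if_neg ht, List.filter_cons_of_neg (by simp [hs])]
          have he : (fun k => s k || t k)
              = fun k => s k || (k == PySem.Str.lower fd.1 || t k) :=
            funext fun k => by
              by_cases hk : k = PySem.Str.lower fd.1
              · simp [hk, hs]
              · have hb : (k == PySem.Str.lower fd.1) = false := by simpa using hk
                simp [hb]
          rw [he, ih]
        · rw [if_neg (by simp [hs, ht]), if_neg ht, List.filter_cons_of_pos (by simp [hs])]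
          have he : (fun k => k == PySem.Str.lower fd.1 || (s k || t k))
              = fun k => s k || (k == PySem.Str.lower fd.1 || t k) := funext fun k => by
            cases s k <;> cases t k <;> cases hk : (k == PySem.Str.lower fd.1) <;> simp
          rw [he, ih]

theorem pv_mem_firsts (l : List (String × String)) (s : String → Bool)
    (kv : String × (String × String)) (h : kv ∈ pvFirsts l s) :
    kv.2 ∈ l ∧ PySem.Str.lower kv.2.1 = kv.1 := by
  induction l generalizing s with
  | nil => simp [pvFirsts] at h
  | cons fd r ih =>
      simp only [pvFirsts] at h
      split at h
      · have := ih _ h; exact ⟨List.mem_cons_of_mem _ this.1, this.2⟩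
      · rcases List.mem_cons.mp h with h | h
        · subst h; exact ⟨List.mem_cons_self, rfl⟩
        · have := ih _ h; exact ⟨List.mem_cons_of_mem _ this.1, this.2⟩

-- Set helper
theorem pv_contains_add (s : PySem.Set String) (x y : String) :
    PySem.Set.contains (PySem.Set.add s x) y = (y == x || PySem.Set.contains s y) := by
  rw [Bool.eq_iff_iff]
  by_cases hm : y = x
  · subst hm; simp [PySem.Set.mem_add]
  · simp [PySem.Set.mem_add, hm]

-- B's dict lookup is pvFind
theorem pv_dict_get (l : List (String × String)) (d : PySem.Dict String (String × String))
    (p : String) :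
    PySem.Dict.get? (l.foldl
      (fun d fd => if PySem.Dict.contains d (PySem.Str.lower fd.1) then d
        else PySem.Dict.insert d (PySem.Str.lower fd.1) fd) d) p
    = (PySem.Dict.get? d p).or (pvFind l p) := by
  induction l generalizing d with
  | nil => simp [pvFind]
  | cons fd r ih =>
      simp only [List.foldl_cons, pvFind, List.find?_cons]
      by_cases hc : PySem.Dict.contains d (PySem.Str.lower fd.1)
      · rw [if_pos hc, ih]
        by_cases hp : PySem.Str.lower fd.1 == p
        · have hp' : PySem.Str.lower fd.1 = p := by simpa using hp
          subst hp'
          rw [PySem.Dict.contains_eq_isSome_get?] at hc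
          rcases Option.isSome_iff_exists.mp hc with ⟨v, hv⟩
          simp [hv, pvFind]
        · simp [hp, pvFind]
      · rw [if_neg hc, ih]
        by_cases hp : PySem.Str.lower fd.1 == p
        · have hp' : PySem.Str.lower fd.1 = p := by simpa using hp
          subst hp'
          have hd : PySem.Dict.get? d (PySem.Str.lower fd.1) = none := by
            rw [PySem.Dict.contains_eq_isSome_get?] at hc
            simpa using hc
          simp [PySem.Dict.get?_insert_self, hd]
        · have hp' : p ≠ PySem.Str.lower fd.1 := fun h => hp (by simp [h])
          rw [PySem.Dict.get?_insert_of_ne _ _ hp']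
          simp [hp, pvFind]

-- B's dict items are the first occurrences
theorem pv_dict_items (l : List (String × String)) (d : PySem.Dict String (String × String))
    (hnd : d.keys.Nodup) :
    (l.foldl (fun d fd => if PySem.Dict.contains d (PySem.Str.lower fd.1) then d
        else PySem.Dict.insert d (PySem.Str.lower fd.1) fd) d).items
    = d.items ++ pvFirsts l (fun k => PySem.Dict.contains d k) := by
  induction l generalizing d with
  | nil => simp [pvFirsts]
  | cons fd r ih =>
      simp only [List.foldl_cons, pvFirsts]
      by_cases hc : PySem.Dict.contains d (PySem.Str.lower fd.1)
      · rw [if_pos hc, if_pos hc, ih d hnd]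
      · rw [if_neg hc, if_neg (by simp [hc]), ih _ (PySem.Dict.nodup_keys_insert _ _ _ hnd)]
        rw [PySem.Dict.items_insert_of_not_contains _ _ (by simpa using hc)]
        rw [pvFirsts_congr r _ (fun k => k == PySem.Str.lower fd.1 || PySem.Dict.contains d k)
          (fun k => PySem.Dict.contains_insert d (PySem.Str.lower fd.1) k fd)]
        simp

-- A's inner preferred loop: no-op when p is already seen
theorem pvA_inner_seen (l : List (String × String)) (p : String)
    (st : List (String × String) × PySem.Set String)
    (h : PySem.Set.contains st.2 p = true) :
    l.foldl (fun st fd =>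
      if PySem.Str.lower fd.1 == p
          && !(PySem.Set.contains st.2 (PySem.Str.lower fd.1)) then
        (st.1 ++ [fd], PySem.Set.add st.2 (PySem.Str.lower fd.1))
      else st) st = st := by
  induction l with
  | nil => rfl
  | cons fd r ih =>
      simp only [List.foldl_cons]
      by_cases hp : PySem.Str.lower fd.1 == p
      · have hp' : PySem.Str.lower fd.1 = p := by simpa using hp
        have hmem : p ∈ st.2 := (PySem.Set.contains_iff _ _).mp h
        rw [if_neg (by simp [hp', hmem])]
        exact ih
      · rw [if_neg (by simp [hp])]
        exact ih

-- A's inner preferred loop: appends the first match (if any) when p is unseen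
theorem pvA_inner_unseen (l : List (String × String)) (p : String)
    (acc : List (String × String)) (s : PySem.Set String)
    (h : PySem.Set.contains s p = false) :
    l.foldl (fun st fd =>
      if PySem.Str.lower fd.1 == p
          && !(PySem.Set.contains st.2 (PySem.Str.lower fd.1)) then
        (st.1 ++ [fd], PySem.Set.add st.2 (PySem.Str.lower fd.1))
      else st) (acc, s)
    = match pvFind l p with
      | none => (acc, s)
      | some fd => (acc ++ [fd], PySem.Set.add s p) := by
  induction l generalizing acc with
  | nil => simp [pvFind]
  | cons fd r ih =>
      simp only [List.foldl_cons, pvFind, List.find?_cons]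
      by_cases hp : PySem.Str.lower fd.1 == p
      · have hp' : PySem.Str.lower fd.1 = p := by simpa using hp
        have hnot : p ∉ s := fun hm => by simp [hm] at h
        rw [if_pos (by simp [hp', hnot]), hp']
        rw [pvA_inner_seen r p _ (by rw [pv_contains_add]; simp)]
        simp
      · rw [if_neg (by simp [hp])]
        rw [ih acc]
        simp [hp, pvFind]

-- A's outer preferred loop
theorem pvA_phase1 (fields : List (String × String)) (prefs : List String)
    (acc : List (String × String)) (s : PySem.Set String)
    (hnd : prefs.Nodup) (hs : ∀ p ∈ prefs, PySem.Set.contains s p = false) :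
    ∃ s', prefs.foldl (fun st preferred =>
        fields.foldl (fun st fd =>
          if PySem.Str.lower fd.1 == preferred
              && !(PySem.Set.contains st.2 (PySem.Str.lower fd.1)) then
            (st.1 ++ [fd], PySem.Set.add st.2 (PySem.Str.lower fd.1))
          else st) st) (acc, s)
      = (acc ++ prefs.flatMap (fun p => (pvFind fields p).toList), s')
      ∧ ∀ k, PySem.Set.contains s' k
          = (PySem.Set.contains s k || (prefs.contains k && (pvFind fields k).isSome)) := by
  induction prefs generalizing acc s with
  | nil => exact ⟨s, by simp⟩
  | cons p ps ih =>
      simp only [List.foldl_cons]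
      rw [pvA_inner_unseen fields p acc s (hs p (by simp))]
      rcases List.nodup_cons.mp hnd with ⟨hpns, hndps⟩
      cases hfind : pvFind fields p with
      | none =>
          rcases ih acc s hndps (fun q hq => hs q (by simp [hq])) with ⟨s', heq, hchar⟩
          refine ⟨s', by simpa [hfind] using heq, fun k => ?_⟩
          rw [hchar k]
          by_cases hk : k = p
          · subst hk; simp [hfind]
          · have hb : (k == p) = false := by simpa using hk
            simp [hk]
      | some fd =>
          have hs' : ∀ q ∈ ps, PySem.Set.contains (PySem.Set.add s p) q = false := by
            intro q hq
            rw [pv_contains_add]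
            have hqp : q ≠ p := fun h => hpns (h ▸ hq)
            have hqs : q ∉ s := by
              have := hs q (by simp [hq]); simpa using this
            simp [hqp, hqs]
          rcases ih (acc ++ [fd]) (PySem.Set.add s p) hndps hs' with ⟨s', heq, hchar⟩
          refine ⟨s', by simpa [hfind] using heq, fun k => ?_⟩
          rw [hchar k, pv_contains_add]
          by_cases hk : k = p
          · subst hk; simp [hfind]
          · have hb : (k == p) = false := by simpa using hk
            simp [hb, hk]

-- A's second loop
theorem pvA_phase2 (l : List (String × String))
    (acc : List (String × String)) (s : PySem.Set String) :
    (l.foldl (fun (st : List (String × String) × PySem.Set String) fd =>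
      if !(PySem.Set.contains st.2 (PySem.Str.lower fd.1)) then
        (st.1 ++ [fd], PySem.Set.add st.2 (PySem.Str.lower fd.1))
      else st) (acc, s)).1
    = acc ++ (pvFirsts l (fun k => PySem.Set.contains s k)).map (fun kv => kv.2) := by
  induction l generalizing acc s with
  | nil => simp [pvFirsts]
  | cons fd r ih =>
      simp only [List.foldl_cons, pvFirsts]
      by_cases hc : PySem.Set.contains s (PySem.Str.lower fd.1)
      · have hcm : PySem.Str.lower fd.1 ∈ s := by simpa using hc
        rw [if_neg (by simp [hcm]), ih, if_pos hc]
      · have hcm : PySem.Str.lower fd.1 ∉ s := by simpa using hc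
        rw [if_pos (by simp [hcm]), ih, if_neg hc]
        rw [pvFirsts_congr r _ (fun k => k == PySem.Str.lower fd.1 || PySem.Set.contains s k)
          (fun k => pv_contains_add s (PySem.Str.lower fd.1) k)]
        simp

-- flatMap of option-toList vs filter+getD
theorem pv_flatMap_toList (l : List String) (f : String → Option (String × String)) :
    l.flatMap (fun p => (f p).toList)
    = (l.filter (fun p => (f p).isSome)).map (fun p => (f p).getD ("", "")) := by
  induction l with
  | nil => rfl
  | cons p r ih =>
      cases hf : f p <;> simp [hf, ih]

theorem pv_preferred_nodup : PREFERRED_FIELDS.Nodup := by decide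

-- ===== VERDICT (by name: the statement is the Claim_ definition above) =====
theorem order_candidate_fields_spec : Claim_equal_order_candidate_fields := by
  intro fields _
  unfold Spec_order_candidate_fields order_candidate_fields order_candidate_fields_alt
  rcases pvA_phase1 fields PREFERRED_FIELDS [] PySem.Set.empty pv_preferred_nodup
      (fun p _ => by simp [PySem.Set.empty]) with ⟨s1, heq, hchar⟩
  rw [heq, pvA_phase2]
  have hget : ∀ p, PySem.Dict.get? (fields.foldl
      (fun d fd => if PySem.Dict.contains d (PySem.Str.lower fd.1) then d
        else PySem.Dict.insert d (PySem.Str.lower fd.1) fd) PySem.Dict.empty) p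
      = pvFind fields p := by
    intro p; rw [pv_dict_get]; simp
  have hcont : ∀ p, PySem.Dict.contains (fields.foldl
      (fun d fd => if PySem.Dict.contains d (PySem.Str.lower fd.1) then d
        else PySem.Dict.insert d (PySem.Str.lower fd.1) fd) PySem.Dict.empty) p
      = (pvFind fields p).isSome := by
    intro p; rw [PySem.Dict.contains_eq_isSome_get?, hget]
  have hitems : (fields.foldl
      (fun d fd => if PySem.Dict.contains d (PySem.Str.lower fd.1) then d
        else PySem.Dict.insert d (PySem.Str.lower fd.1) fd) PySem.Dict.empty).items
      = pvFirsts fields (fun _ => false) := by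
    rw [pv_dict_items _ _ PySem.Dict.nodup_keys_empty]
    have hemp : (PySem.Dict.empty : PySem.Dict String (String × String)).items = [] := rfl
    rw [hemp, List.nil_append]
    exact pvFirsts_congr _ _ _ (fun k => by simp [PySem.Dict.contains_empty])
  -- head part
  have hhead : List.nil ++ PREFERRED_FIELDS.flatMap (fun p => (pvFind fields p).toList)
      = (PREFERRED_FIELDS.filter (fun p => (pvFind fields p).isSome)).map
          (fun p => (pvFind fields p).getD ("", "")) := by
    rw [List.nil_append, pv_flatMap_toList]
  -- tail part
  have hseen : ∀ k, PySem.Set.contains s1 k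
      = (PREFERRED_FIELDS.contains k && (pvFind fields k).isSome) := by
    intro k; rw [hchar k]; simp [PySem.Set.empty]
  have htail : (pvFirsts fields (fun k => PySem.Set.contains s1 k)).map (fun kv => kv.2)
      = ((pvFirsts fields (fun _ => false)).filter
          (fun kv => !(PySem.Set.contains (PySem.Set.ofList PREFERRED_FIELDS) kv.1))).map
          (fun kv => kv.2) := by
    rw [pvFirsts_congr fields _
        (fun k => (PREFERRED_FIELDS.contains k && (pvFind fields k).isSome) || false)
        (fun k => by rw [hseen k]; exact (Bool.or_false _).symm)]
    rw [pvFirsts_or]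
    congr 1
    apply List.filter_congr
    intro kv hkv
    rcases pv_mem_firsts fields _ kv hkv with ⟨hmem, hlow⟩
    have hsome : (pvFind fields kv.1).isSome = true := by
      rw [pvFind, List.find?_isSome]
      exact ⟨kv.2, hmem, by simp [hlow]⟩
    have hpref : PySem.Set.contains (PySem.Set.ofList PREFERRED_FIELDS) kv.1
        = PREFERRED_FIELDS.contains kv.1 := by
      rw [Bool.eq_iff_iff]
      simp [PySem.Set.mem_ofList, List.contains_eq_mem]
    rw [hsome, hpref]
    simp
  rw [hhead, htail]
  congr 1
  · congr 1
    · funext p; rw [hget p]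
    · exact List.filter_congr (fun p _ => (hcont p).symm)
  · rw [hitems]
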